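-- pv_equiv track=rewrite | github.com/norikinishida/utils | utils/utils.py | get_boundary_indicators_for_sorted_array
-- ===== SOURCE A (Python) =====
-- def get_boundary_indicators_for_sorted_array(sorted_array):
--     """
--     Parameters
--     ----------
--     sorted_array: list[int]
--
--     Returns
--     -------
--     list[bool]
--     list[bool]
--     """
--     start_indicators = [True]
--     for i in range(1, len(sorted_array)):
--         if sorted_array[i] != sorted_array[i - 1]:
--             start_indicators.append(True)
--         else:
--             start_indicators.append(False)
--
--     end_indicators = [True]
--     for i in range(len(sorted_array) - 2, -1, -1):
--         if sorted_array[i] != sorted_array[i + 1]: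
--             end_indicators.append(True)
--         else:
--             end_indicators.append(False)
--     end_indicators = end_indicators[::-1]
--
--     return start_indicators, end_indicators
-- ===== SOURCE B (Python) =====
-- def get_boundary_indicators_for_sorted_array(sorted_array):
--     # Run-length encode the sorted array, then emit one block per run:
--     # a run of k equal values contributes [True]+[False]*(k-1) to the starts
--     # and [False]*(k-1)+[True] to the ends. Empty input gives ([], []).
--     runs = []
--     for x in sorted_array:
--         if runs and runs[-1][0] == x:
--             runs[-1][1] += 1
--         else:
--             runs.append([x, 1])
--     start_indicators = []
--     end_indicators = []
--     for _, k in runs: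
--         start_indicators += [True] + [False] * (k - 1)
--         end_indicators += [False] * (k - 1) + [True]
--     return start_indicators, end_indicators
-- ===== Notes on version B (the rewrite author's own statement) =====
-- stated objective: alternative
-- what changed: B run-length encodes the array into (value, count) runs in one pass and then emits a whole True/False block per run for both indicator lists, instead of A's two element-wise neighbour-comparison passes (forward and reverse with a final reversal).
-- intended difference: On the empty list A returns ([True],[True]) (an artifact of its [True] seeds, indicator lists longer than the array), while B returns ([],[]), the intended length-matching indicators. — e.g. on get_boundary_indicators_for_sorted_array([]): A returns ([true], [true]), B returns ([], [])
import Mathlib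
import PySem

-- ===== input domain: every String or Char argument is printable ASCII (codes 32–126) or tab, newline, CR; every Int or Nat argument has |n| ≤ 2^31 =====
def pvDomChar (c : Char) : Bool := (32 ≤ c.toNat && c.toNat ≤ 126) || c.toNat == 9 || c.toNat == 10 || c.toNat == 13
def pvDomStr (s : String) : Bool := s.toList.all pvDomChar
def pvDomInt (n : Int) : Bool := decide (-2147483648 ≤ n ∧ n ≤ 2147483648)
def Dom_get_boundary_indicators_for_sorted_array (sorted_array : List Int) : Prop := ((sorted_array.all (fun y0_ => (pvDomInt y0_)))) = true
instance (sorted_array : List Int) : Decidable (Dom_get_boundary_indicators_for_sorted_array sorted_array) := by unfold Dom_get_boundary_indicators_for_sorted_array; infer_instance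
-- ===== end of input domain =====

-- B run-length encodes the array and emits one True/False block per run, replacing A's two
-- neighbour-comparison passes; on the empty list A returns ([True],[True]) and B returns ([],[]).

-- ===== PORT A =====
def get_boundary_indicators_for_sorted_array (sorted_array : List Int) : List Bool × List Bool :=
  let n : Int := sorted_array.length
  -- forward loop: for i in range(1, len(sorted_array))
  let start_indicators :=
    (PySem.List.pyRange 1 n 1).foldl
      (fun acc i =>
        if PySem.List.pyGetD sorted_array i 0 ≠ PySem.List.pyGetD sorted_array (i - 1) 0
        then acc ++ [true] else acc ++ [false]) [true]
  -- reverse loop: for i in range(len(sorted_array) - 2, -1, -1), then [::-1]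
  let end_indicators :=
    (PySem.List.pyRange (n - 2) (-1) (-1)).foldl
      (fun acc i =>
        if PySem.List.pyGetD sorted_array i 0 ≠ PySem.List.pyGetD sorted_array (i + 1) 0
        then acc ++ [true] else acc ++ [false]) [true]
  (start_indicators, end_indicators.reverse)

-- ===== PORT B =====
-- first loop of Source B: build the run-length encoding (value, count), bumping the last run
def pvRunStep (rs : List (Int × Int)) (x : Int) : List (Int × Int) :=
  match rs.getLast? with
  | some (v, k) => if v = x then rs.dropLast ++ [(v, k + 1)] else rs ++ [(x, 1)]
  | none => rs ++ [(x, 1)]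

def get_boundary_indicators_for_sorted_array_alt (sorted_array : List Int) : List Bool × List Bool :=
  let runs := sorted_array.foldl pvRunStep []
  -- second loop of Source B: one block per run
  runs.foldl
    (fun acc r =>
      (acc.1 ++ true :: List.replicate (r.2 - 1).toNat false,
       acc.2 ++ List.replicate (r.2 - 1).toNat false ++ [true])) ([], [])

-- ===== PRECONDITION & SPEC =====
-- On the empty list A returns ([True],[True]) (artifact of its [True] seeds: indicator lists
-- longer than the array), while B returns ([],[]), the intended length-matching indicators.
def D_get_boundary_indicators_for_sorted_array (sorted_array : List Int) : Prop := sorted_array = []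
instance (sorted_array : List Int) : Decidable (D_get_boundary_indicators_for_sorted_array sorted_array) := by unfold D_get_boundary_indicators_for_sorted_array; infer_instance

def Spec_get_boundary_indicators_for_sorted_array (sorted_array : List Int) (out : List Bool × List Bool) : Prop := ¬ D_get_boundary_indicators_for_sorted_array sorted_array → out = get_boundary_indicators_for_sorted_array_alt sorted_array
instance (sorted_array : List Int) (out : List Bool × List Bool) : Decidable (Spec_get_boundary_indicators_for_sorted_array sorted_array out) := by unfold Spec_get_boundary_indicators_for_sorted_array; infer_instance

def pvDiffWitness_get_boundary_indicators_for_sorted_array : List Int := []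
def pvDiffWitnessOut_get_boundary_indicators_for_sorted_array : (List Bool × List Bool) × (List Bool × List Bool) :=
  (([true], [true]), ([], []))

-- ===== CLAIM (what is proved, stated in full; the proofs are below) =====
def Claim_unchanged_get_boundary_indicators_for_sorted_array : Prop := ∀ (sorted_array : List Int), Dom_get_boundary_indicators_for_sorted_array sorted_array → Spec_get_boundary_indicators_for_sorted_array sorted_array (get_boundary_indicators_for_sorted_array sorted_array)
def Claim_changed_get_boundary_indicators_for_sorted_array : Prop := Dom_get_boundary_indicators_for_sorted_array (pvDiffWitness_get_boundary_indicators_for_sorted_array) ∧ D_get_boundary_indicators_for_sorted_array (pvDiffWitness_get_boundary_indicators_for_sorted_array) ∧ get_boundary_indicators_for_sorted_array (pvDiffWitness_get_boundary_indicators_for_sorted_array) = pvDiffWitnessOut_get_boundary_indicators_for_sorted_array.1 ∧ get_boundary_indicators_for_sorted_array_alt (pvDiffWitness_get_boundary_indicators_for_sorted_array) = pvDiffWitnessOut_get_boundary_indicators_for_sorted_array.2 ∧ pvDiffWitnessOut_get_boundary_indicators_for_sorted_array.1 ≠ pvDiffWitnessOut_get_boundary_indicators_for_sorted_array.2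
def Claim_exact_get_boundary_indicators_for_sorted_array : Prop := ∀ (sorted_array : List Int), Dom_get_boundary_indicators_for_sorted_array sorted_array → D_get_boundary_indicators_for_sorted_array sorted_array → get_boundary_indicators_for_sorted_array sorted_array ≠ get_boundary_indicators_for_sorted_array_alt sorted_array

-- ===== LEMMAS AND PROOFS =====

-- "each element vs its predecessor" comparison list, recursively
def pvZf (p : Int) : List Int → List Bool
  | [] => []
  | x :: xs => decide (x ≠ p) :: pvZf x xs

-- functional form of B's first loop after the first element
def pvBump (v k : Int) : List Int → List (Int × Int)
  | [] => [(v, k)]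
  | x :: xs => if x = v then pvBump v (k + 1) xs else (v, k) :: pvBump x 1 xs

-- start / end blocks emitted from a run list
def pvEmitS : List (Int × Int) → List Bool
  | [] => []
  | r :: rs => (true :: List.replicate (r.2 - 1).toNat false) ++ pvEmitS rs
def pvEmitE : List (Int × Int) → List Bool
  | [] => []
  | r :: rs => (List.replicate (r.2 - 1).toNat false ++ [true]) ++ pvEmitE rs

-- ---- A-side characterisation ----
theorem foldl_append_decide (l : List Int) (f : Int → Prop) [DecidablePred f] (init : List Bool) :
    l.foldl (fun acc i => if f i then acc ++ [true] else acc ++ [false]) init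
      = init ++ l.map (fun i => decide (f i)) := by
  induction l generalizing init with
  | nil => simp
  | cons x xs ih =>
    simp only [List.foldl_cons, List.map_cons, ih]
    by_cases h : f x <;> simp [h]

theorem start_map_eq_zip (xs : List Int) :
    (PySem.List.pyRange 1 (xs.length : Int) 1).map
        (fun i => decide (PySem.List.pyGetD xs i 0 ≠ PySem.List.pyGetD xs (i - 1) 0))
      = (xs.tail.zip xs).map (fun p => decide (p.1 ≠ p.2)) := by
  apply List.ext_getElem
  · simp [PySem.List.length_pyRange_one, List.length_zip, List.length_tail]
  · intro k h1 h2
    have hk : k < xs.length - 1 := by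
      simp [List.length_zip, List.length_tail] at h2; omega
    simp only [List.getElem_map, List.getElem_zip, List.getElem_tail]
    rw [PySem.List.getElem_pyRange_one]
    rw [PySem.List.pyGetD_eq_getElem xs 0 (by omega) (by omega),
        PySem.List.pyGetD_eq_getElem xs 0 (by omega) (by omega)]
    have ht1 : ((1 : Int) + (k : Int)).toNat = k + 1 := by omega
    have ht2 : ((1 : Int) + (k : Int) - 1).toNat = k := by omega
    simp only [ht1, ht2]

theorem end_map_eq_zip (xs : List Int) :
    (PySem.List.pyRange 0 ((xs.length : Int) - 1) 1).map
        (fun i => decide (PySem.List.pyGetD xs i 0 ≠ PySem.List.pyGetD xs (i + 1) 0))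
      = (xs.tail.zip xs).map (fun p => decide (p.1 ≠ p.2)) := by
  apply List.ext_getElem
  · simp [PySem.List.length_pyRange_one, List.length_zip, List.length_tail]
  · intro k h1 h2
    have hk : k < xs.length - 1 := by
      simp [List.length_zip, List.length_tail] at h2; omega
    simp only [List.getElem_map, List.getElem_zip, List.getElem_tail]
    rw [PySem.List.getElem_pyRange_one]
    rw [PySem.List.pyGetD_eq_getElem xs 0 (by omega) (by omega),
        PySem.List.pyGetD_eq_getElem xs 0 (by omega) (by omega)]
    have ht1 : ((0 : Int) + (k : Int)).toNat = k := by omega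
    have ht2 : ((0 : Int) + (k : Int) + 1).toNat = k + 1 := by omega
    simp only [ht1, ht2]
    rw [decide_eq_decide]
    exact ne_comm

theorem start_eq (xs : List Int) :
    (PySem.List.pyRange 1 (xs.length : Int) 1).foldl
      (fun acc i =>
        if PySem.List.pyGetD xs i 0 ≠ PySem.List.pyGetD xs (i - 1) 0
        then acc ++ [true] else acc ++ [false]) [true]
    = true :: (xs.tail.zip xs).map (fun p => decide (p.1 ≠ p.2)) := by
  rw [foldl_append_decide, start_map_eq_zip]
  rfl

theorem end_eq (xs : List Int) :
    ((PySem.List.pyRange ((xs.length : Int) - 2) (-1) (-1)).foldl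
      (fun acc i =>
        if PySem.List.pyGetD xs i 0 ≠ PySem.List.pyGetD xs (i + 1) 0
        then acc ++ [true] else acc ++ [false]) [true]).reverse
    = (xs.tail.zip xs).map (fun p => decide (p.1 ≠ p.2)) ++ [true] := by
  rw [foldl_append_decide, PySem.List.pyRange_neg_one_eq_reverse]
  have h1 : (-1 : Int) + 1 = 0 := by norm_num
  have h2 : ((xs.length : Int) - 2) + 1 = (xs.length : Int) - 1 := by ring
  rw [h1, h2, List.map_reverse, List.reverse_append, List.reverse_reverse,
      List.reverse_singleton, end_map_eq_zip]

theorem zf_eq_zip (x : Int) (xs : List Int) :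
    pvZf x xs = (xs.zip (x :: xs)).map (fun p => decide (p.1 ≠ p.2)) := by
  induction xs generalizing x with
  | nil => rfl
  | cons y ys ih => simp [pvZf, ih y]

-- ---- B-side characterisation ----
theorem foldl_runStep (xs : List Int) : ∀ (rs : List (Int × Int)) (v k : Int),
    xs.foldl pvRunStep (rs ++ [(v, k)]) = rs ++ pvBump v k xs := by
  induction xs with
  | nil => intro rs v k; rfl
  | cons x t ih =>
    intro rs v k
    simp only [List.foldl_cons, pvRunStep, List.getLast?_concat, pvBump]
    by_cases h : v = x
    · subst h
      simp only [if_pos, List.dropLast_concat]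
      exact ih rs v (k + 1)
    · have hx : ¬ x = v := fun hh => h hh.symm
      simp only [if_neg h, if_neg hx]
      rw [ih (rs ++ [(v, k)]) x 1]
      simp

theorem foldl_emit (rs : List (Int × Int)) : ∀ (s e : List Bool),
    rs.foldl
      (fun acc r =>
        (acc.1 ++ true :: List.replicate (r.2 - 1).toNat false,
         acc.2 ++ List.replicate (r.2 - 1).toNat false ++ [true])) (s, e)
    = (s ++ pvEmitS rs, e ++ pvEmitE rs) := by
  induction rs with
  | nil => intro s e; simp [pvEmitS, pvEmitE]
  | cons r t ih =>
    intro s e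
    simp only [List.foldl_cons, ih, pvEmitS, pvEmitE]
    simp

theorem emitS_bump (xs : List Int) : ∀ (v k : Int), 1 ≤ k →
    pvEmitS (pvBump v k xs) = (true :: List.replicate (k - 1).toNat false) ++ pvZf v xs := by
  induction xs with
  | nil => intro v k _; simp [pvBump, pvEmitS, pvZf]
  | cons x t ih =>
    intro v k hk
    simp only [pvBump]
    by_cases h : x = v
    · rw [if_pos h, ih v (k + 1) (by omega), h, pvZf]
      obtain ⟨n, hn⟩ : ∃ n, k.toNat = n + 1 := ⟨k.toNat - 1, by omega⟩
      have h1 : (k + 1 - 1).toNat = n + 1 := by omega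
      have h2 : (k - 1).toNat = n := by omega
      rw [h1, h2, List.replicate_succ']
      simp
    · rw [if_neg h, pvZf]
      simp only [pvEmitS, ih x 1 (by omega)]
      simp [h]

theorem emitE_bump (xs : List Int) : ∀ (v k : Int), 1 ≤ k →
    pvEmitE (pvBump v k xs) = List.replicate (k - 1).toNat false ++ pvZf v xs ++ [true] := by
  induction xs with
  | nil => intro v k _; simp [pvBump, pvEmitE, pvZf]
  | cons x t ih =>
    intro v k hk
    simp only [pvBump]
    by_cases h : x = v
    · rw [if_pos h, ih v (k + 1) (by omega), h, pvZf]
      obtain ⟨n, hn⟩ : ∃ n, k.toNat = n + 1 := ⟨k.toNat - 1, by omega⟩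
      have h1 : (k + 1 - 1).toNat = n + 1 := by omega
      have h2 : (k - 1).toNat = n := by omega
      rw [h1, h2, List.replicate_succ']
      simp
    · rw [if_neg h, pvZf]
      simp only [pvEmitE, ih x 1 (by omega)]
      simp [h]

theorem alt_cons (x : Int) (xs : List Int) :
    get_boundary_indicators_for_sorted_array_alt (x :: xs)
      = (true :: pvZf x xs, pvZf x xs ++ [true]) := by
  unfold get_boundary_indicators_for_sorted_array_alt
  have hruns : (x :: xs).foldl pvRunStep [] = pvBump x 1 xs := by
    have : (x :: xs).foldl pvRunStep [] = xs.foldl pvRunStep ([] ++ [(x, 1)]) := rfl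
    rw [this, foldl_runStep xs [] x 1]; rfl
  simp only [hruns, foldl_emit]
  rw [emitS_bump xs x 1 (by omega), emitE_bump xs x 1 (by omega)]
  simp

-- ===== VERDICT (by name: the statement is the Claim_ definition above) =====
theorem get_boundary_indicators_for_sorted_array_spec : Claim_unchanged_get_boundary_indicators_for_sorted_array := by
  intro xs _
  unfold Spec_get_boundary_indicators_for_sorted_array D_get_boundary_indicators_for_sorted_array
  intro hne
  cases xs with
  | nil => exact absurd rfl hne
  | cons x t =>
    rw [alt_cons, zf_eq_zip]
    unfold get_boundary_indicators_for_sorted_array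
    simp only [start_eq, end_eq]
    rfl

theorem get_boundary_indicators_for_sorted_array_changed : Claim_changed_get_boundary_indicators_for_sorted_array := by
  unfold Claim_changed_get_boundary_indicators_for_sorted_array; decide

theorem get_boundary_indicators_for_sorted_array_tight : Claim_exact_get_boundary_indicators_for_sorted_array := by
  intro xs _ hD
  subst hD
  decide
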